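-- pv_equiv track=rewrite | github.com/joaomanoelmoreno/soulnutri-ai-server | backend/organize_images.py | find_best_matching_folder
-- ===== SOURCE A (Python) =====
-- def find_best_matching_folder(dish_name: str, existing_folders: list) -> str:
--     """
--     Encontra a pasta correspondente ao nome do prato.
--     """
--     # Normaliza o nome do prato
--     dish_normalized = dish_name.lower().replace(' ', '').replace('_', '').replace('-', '')
--
--     # 1. Match exato
--     for folder in existing_folders:
--         if folder.lower() == dish_name:
--             return folder
--
--     # 2. Match normalizado
--     for folder in existing_folders:
--         folder_normalized = folder.lower().replace(' ', '').replace('_', '').replace('-', '')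
--         if folder_normalized == dish_normalized:
--             return folder
--
--     # 3. Match parcial (contém)
--     for folder in existing_folders:
--         folder_normalized = folder.lower().replace(' ', '').replace('_', '').replace('-', '')
--         if dish_normalized in folder_normalized or folder_normalized in dish_normalized:
--             return folder
--
--     # 4. Se não encontrou, usa o nome normalizado
--     return dish_name
-- ===== SOURCE B (Python) =====
-- def find_best_matching_folder(dish_name: str, existing_folders: list) -> str:
--     """
--     Single pass: classify each folder with a priority (1 exact, 2 normalized,
--     3 partial) and keep the first folder seen at the lowest priority.
--     """
--     dish_normalized = dish_name.lower().replace(' ', '').replace('_', '').replace('-', '')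
--     best = None  # (priority, folder)
--     for folder in existing_folders:
--         folder_normalized = folder.lower().replace(' ', '').replace('_', '').replace('-', '')
--         if folder.lower() == dish_name:
--             priority = 1
--         elif folder_normalized == dish_normalized:
--             priority = 2
--         elif dish_normalized in folder_normalized or folder_normalized in dish_normalized:
--             priority = 3
--         else:
--             continue
--         if best is None or priority < best[0]:
--             best = (priority, folder)
--     return best[1] if best is not None else dish_name
-- ===== Notes on version B (the rewrite author's own statement) =====
-- stated objective: simpler
-- what changed: Replaces A's three sequential scans over the folder list by one single pass that assigns each folder a priority (exact/normalized/partial) and keeps the first folder at the lowest priority, normalizing each folder once instead of up to twice.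
import Mathlib
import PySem

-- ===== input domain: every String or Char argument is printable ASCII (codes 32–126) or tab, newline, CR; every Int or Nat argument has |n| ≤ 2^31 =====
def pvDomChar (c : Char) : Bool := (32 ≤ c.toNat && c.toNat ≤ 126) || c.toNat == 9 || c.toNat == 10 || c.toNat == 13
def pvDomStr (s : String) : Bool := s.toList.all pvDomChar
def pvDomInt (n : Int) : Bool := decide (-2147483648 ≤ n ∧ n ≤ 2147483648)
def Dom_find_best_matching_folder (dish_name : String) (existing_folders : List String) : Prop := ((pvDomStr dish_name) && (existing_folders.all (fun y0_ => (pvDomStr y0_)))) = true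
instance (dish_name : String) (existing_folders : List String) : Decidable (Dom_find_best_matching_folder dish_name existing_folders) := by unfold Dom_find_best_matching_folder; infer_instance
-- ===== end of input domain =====

-- B replaces A's three sequential scans by one single pass that keeps the first
-- folder at the lowest priority (1 exact, 2 normalized, 3 partial); objective: simpler.

-- ===== PORT A =====
-- shared normalization: s.lower().replace(' ','').replace('_','').replace('-','')
def pvNorm (s : String) : String :=
  PySem.Str.replace (PySem.Str.replace (PySem.Str.replace (PySem.Str.lower s) " " "") "_" "") "-" ""

-- loop 1 of A: first folder with folder.lower() == dish_name
def pvScan1 (dn : String) : List String → Option String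
  | [] => none
  | f :: rest => if PySem.Str.lower f == dn then some f else pvScan1 dn rest

-- loop 2 of A: first folder whose normalized form equals dish_normalized
def pvScan2 (dnorm : String) : List String → Option String
  | [] => none
  | f :: rest => if pvNorm f == dnorm then some f else pvScan2 dnorm rest

-- loop 3 of A: first folder with mutual substring containment of normalized forms
def pvScan3 (dnorm : String) : List String → Option String
  | [] => none
  | f :: rest =>
      if PySem.Str.isIn dnorm (pvNorm f) || PySem.Str.isIn (pvNorm f) dnorm then some f
      else pvScan3 dnorm rest

def find_best_matching_folder (dish_name : String) (existing_folders : List String) : String :=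
  let dish_normalized := pvNorm dish_name
  match pvScan1 dish_name existing_folders with
  | some f => f
  | none =>
    match pvScan2 dish_normalized existing_folders with
    | some f => f
    | none =>
      match pvScan3 dish_normalized existing_folders with
      | some f => f
      | none => dish_name

-- ===== PORT B =====
-- priority of one folder: 1 exact, 2 normalized, 3 partial, none otherwise
def pvPrio (dn dnorm f : String) : Option Nat :=
  let fn := pvNorm f
  if PySem.Str.lower f == dn then some 1
  else if fn == dnorm then some 2
  else if PySem.Str.isIn dnorm fn || PySem.Str.isIn fn dnorm then some 3
  else none

-- B's single for-loop over existing_folders with accumulator best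
def pvLoop (dn dnorm : String) : List String → Option (Nat × String) → Option (Nat × String)
  | [], best => best
  | f :: rest, best =>
      let best' :=
        match pvPrio dn dnorm f, best with
        | some p, none => some (p, f)
        | some p, some (bp, bf) => if p < bp then some (p, f) else some (bp, bf)
        | none, b => b
      pvLoop dn dnorm rest best'

def find_best_matching_folder_alt (dish_name : String) (existing_folders : List String) : String :=
  match pvLoop dish_name (pvNorm dish_name) existing_folders none with
  | some (_, f) => f
  | none => dish_name

-- ===== PRECONDITION & SPEC =====
def Spec_find_best_matching_folder (dish_name : String) (existing_folders : List String) (out : String) : Prop := out = find_best_matching_folder_alt dish_name existing_folders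
instance (dish_name : String) (existing_folders : List String) (out : String) : Decidable (Spec_find_best_matching_folder dish_name existing_folders out) := by unfold Spec_find_best_matching_folder; infer_instance

-- ===== CLAIM (what is proved, stated in full; the proofs are below) =====
def Claim_equal_find_best_matching_folder : Prop := ∀ (dish_name : String) (existing_folders : List String), Dom_find_best_matching_folder dish_name existing_folders → Spec_find_best_matching_folder dish_name existing_folders (find_best_matching_folder dish_name existing_folders)

-- ===== LEMMAS AND PROOFS =====

theorem pvLoop_one (dn dnorm : String) (l : List String) (f : String) :
    pvLoop dn dnorm l (some (1, f)) = some (1, f) := by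
  induction l with
  | nil => rfl
  | cons x rest ih =>
      simp only [pvLoop, pvPrio]
      split_ifs <;> simpa using ih

theorem pvLoop_two (dn dnorm : String) (l : List String) (f : String) :
    pvLoop dn dnorm l (some (2, f)) =
      match pvScan1 dn l with
      | some g => some (1, g)
      | none => some (2, f) := by
  induction l with
  | nil => rfl
  | cons x rest ih =>
      simp only [pvLoop, pvPrio, pvScan1]
      split_ifs <;> simp [*, pvLoop_one]

theorem pvLoop_three (dn dnorm : String) (l : List String) (f : String) :
    pvLoop dn dnorm l (some (3, f)) =
      match pvScan1 dn l with
      | some g => some (1, g)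
      | none =>
        match pvScan2 dnorm l with
        | some g => some (2, g)
        | none => some (3, f) := by
  induction l with
  | nil => rfl
  | cons x rest ih =>
      simp only [pvLoop, pvPrio, pvScan1, pvScan2]
      split_ifs <;> simp [*, pvLoop_one, pvLoop_two]

theorem pvLoop_none (dn dnorm : String) (l : List String) :
    pvLoop dn dnorm l none =
      match pvScan1 dn l with
      | some g => some (1, g)
      | none =>
        match pvScan2 dnorm l with
        | some g => some (2, g)
        | none =>
          match pvScan3 dnorm l with
          | some g => some (3, g)
          | none => none := by
  induction l with
  | nil => rfl
  | cons x rest ih =>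
      simp only [pvLoop, pvPrio, pvScan1, pvScan2, pvScan3]
      split_ifs <;> simp [*, pvLoop_one, pvLoop_two, pvLoop_three]

-- ===== VERDICT (by name: the statement is the Claim_ definition above) =====
theorem find_best_matching_folder_spec : Claim_equal_find_best_matching_folder := by
  intro dn folders _
  unfold Spec_find_best_matching_folder find_best_matching_folder find_best_matching_folder_alt
  rw [pvLoop_none]
  cases h1 : pvScan1 dn folders <;>
    cases h2 : pvScan2 (pvNorm dn) folders <;>
      cases h3 : pvScan3 (pvNorm dn) folders <;> simp [h2, h3]
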